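-- pv_equiv track=rewrite | github.com/CryAndRRich/hustack | leetcode/array/3511_Make_a_Positive_Array/codes/pref.py | makeArrayPositive
-- ===== SOURCE A (Python) =====
-- from typing import List
--
-- def makeArrayPositive(nums: List[int]) -> int:
--     n = len(nums)
--     pref = [0] * (n + 1)
--     for i in range(n):
--         pref[i+1] = pref[i] + nums[i]
--     res = 0
--     covered = -1
--     for end in range(2, n):
--         need = False
--         for l in (3, 4, 5):
--             start = end - (l - 1)
--             if start < 0:
--                 continue
--             if covered >= start and covered <= end:
--                 continue
--             if pref[end+1] - pref[start] <= 0: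
--                 need = True
--                 break
--         if need:
--             res += 1
--             covered = end
--     return res
-- ===== SOURCE B (Python) =====
-- from typing import List
--
-- def makeArrayPositive(nums: List[int]) -> int:
--     res = 0
--     covered = -1
--     for end in range(2, len(nums)):
--         if any(end - l + 1 >= 0 and covered < end - l + 1
--                and sum(nums[end - l + 1:end + 1]) <= 0
--                for l in (3, 4, 5)):
--             res += 1
--             covered = end
--     return res
-- ===== Notes on version B (the rewrite author's own statement) =====
-- stated objective: simpler
-- what changed: B removes A's precomputed prefix-sum table and the redundant `covered <= end` test, computing each constant-size (3/4/5-element) window sum directly with a slice inside a single any(); A's two building passes and its pref array disappear.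
import Mathlib
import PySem

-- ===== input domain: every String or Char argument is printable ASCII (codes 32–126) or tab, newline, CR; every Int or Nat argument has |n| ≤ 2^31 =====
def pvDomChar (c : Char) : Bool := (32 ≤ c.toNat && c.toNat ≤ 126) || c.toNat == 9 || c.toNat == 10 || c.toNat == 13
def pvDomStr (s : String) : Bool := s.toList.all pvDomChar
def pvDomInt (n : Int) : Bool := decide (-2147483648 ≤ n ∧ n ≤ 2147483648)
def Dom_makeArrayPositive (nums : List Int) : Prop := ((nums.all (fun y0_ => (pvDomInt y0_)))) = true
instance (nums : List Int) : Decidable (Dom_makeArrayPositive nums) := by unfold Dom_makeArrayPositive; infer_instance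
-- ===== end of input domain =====

-- B drops A's prefix-sum table and the redundant `covered <= end` test: each 3/4/5-window
-- sum is computed directly from the list (objective: simpler). Return values agree on all inputs.

-- ===== PORT A =====
-- pref = [0]*(n+1); for i in range(n): pref[i+1] = pref[i] + nums[i]
-- (all indices are provably in range, so the total forms pyGetD/pySetD are exact here)
def pvBuildPref (nums : List Int) : List Int :=
  (PySem.List.pyRange 0 (nums.length : Int) 1).foldl
    (fun pref i =>
      PySem.List.pySetD pref (i + 1) (PySem.List.pyGetD pref i 0 + PySem.List.pyGetD nums i 0))
    (List.replicate (nums.length + 1) 0)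

-- the inner `for l in (3,4,5)` loop with its `continue`s and `break` (returns the `need` flag)
def pvInnerA (pref : List Int) (covered e : Int) : List Int → Bool
  | [] => false
  | l :: ls =>
    let start := e - (l - 1)
    if start < 0 then pvInnerA pref covered e ls
    else if covered ≥ start && covered ≤ e then pvInnerA pref covered e ls
    else if PySem.List.pyGetD pref (e + 1) 0 - PySem.List.pyGetD pref start 0 ≤ 0 then true
    else pvInnerA pref covered e ls

def makeArrayPositive (nums : List Int) : Int :=
  let pref := pvBuildPref nums
  ((PySem.List.pyRange 2 (nums.length : Int) 1).foldl
    (fun st e => if pvInnerA pref st.2 e [3, 4, 5] then (st.1 + 1, e) else st)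
    ((0 : Int), (-1 : Int))).1

-- ===== PORT B =====
-- sum(nums[start:end+1])
def pvWin (nums : List Int) (s e : Int) : Int :=
  (PySem.List.slice nums (some s) (some (e + 1))).sum

-- any(... for l in (3,4,5))
def pvAnyB (nums : List Int) (covered e : Int) : Bool :=
  [3, 4, 5].any (fun l =>
    decide (e - l + 1 ≥ 0) && decide (covered < e - l + 1) &&
    decide (pvWin nums (e - l + 1) e ≤ 0))

def makeArrayPositive_alt (nums : List Int) : Int :=
  ((PySem.List.pyRange 2 (nums.length : Int) 1).foldl
    (fun st e => if pvAnyB nums st.2 e then (st.1 + 1, e) else st)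
    ((0 : Int), (-1 : Int))).1

-- ===== PRECONDITION & SPEC =====
def Spec_makeArrayPositive (nums : List Int) (out : Int) : Prop := out = makeArrayPositive_alt nums
instance (nums : List Int) (out : Int) : Decidable (Spec_makeArrayPositive nums out) := by unfold Spec_makeArrayPositive; infer_instance

-- ===== CLAIM (what is proved, stated in full; the proofs are below) =====
def Claim_equal_makeArrayPositive : Prop := ∀ (nums : List Int), Dom_makeArrayPositive nums → Spec_makeArrayPositive nums (makeArrayPositive nums)

-- ===== LEMMAS AND PROOFS =====

-- After processing range(0, m) the prefix list is the prefix sums up to m, zeros beyond.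
theorem pvBuildPref_partial (nums : List Int) (m : Nat) (hm : m ≤ nums.length) :
    (PySem.List.pyRange 0 (m : Int) 1).foldl
      (fun pref i =>
        PySem.List.pySetD pref (i + 1) (PySem.List.pyGetD pref i 0 + PySem.List.pyGetD nums i 0))
      (List.replicate (nums.length + 1) 0)
    = (List.range (m + 1)).map (fun k => (nums.take k).sum)
      ++ List.replicate (nums.length - m) 0 := by
  induction m with
  | zero =>
    simp [PySem.List.pyRange_one_eq_nil, List.range_succ]
    cases nums <;> simp [List.replicate_succ]
  | succ m ih =>
    have hm' : m ≤ nums.length := by omega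
    have hmlt : m < nums.length := by omega
    have hcast : ((m + 1 : Nat) : Int) = (m : Int) + 1 := by push_cast; ring
    rw [hcast, PySem.List.pyRange_one_succ_right (by positivity), List.foldl_append, ih hm']
    simp only [List.foldl_cons, List.foldl_nil]
    have hget1 : PySem.List.pyGetD
        (List.map (fun k => (nums.take k).sum) (List.range (m + 1))
          ++ List.replicate (nums.length - m) 0) (m : Int) 0 = (nums.take m).sum := by
      rw [PySem.List.pyGetD_natCast, List.getD_eq_getElem?_getD,
        List.getElem?_append_left (by simp)]
      simp
    have hget2 : PySem.List.pyGetD nums (m : Int) 0 = nums[m] := by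
      rw [PySem.List.pyGetD_natCast, List.getD_eq_getElem?_getD, List.getElem?_eq_getElem hmlt]
      rfl
    rw [hget1, hget2, show (m : Int) + 1 = ((m + 1 : Nat) : Int) by push_cast; ring,
      PySem.List.pySetD_natCast]
    rw [List.set_append_right _ _ (by simp),
      show List.replicate (nums.length - m) (0 : Int)
          = 0 :: List.replicate (nums.length - (m + 1)) 0 by
        rw [← List.replicate_succ]; congr 1; omega]
    simp only [List.length_map, List.length_range]
    rw [List.range_succ (n := m + 1), List.map_append]
    simp only [List.map_cons, List.map_nil, List.append_assoc, List.cons_append, List.nil_append]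
    congr 2
    rw [List.take_add_one, List.sum_append, List.getElem?_eq_getElem hmlt]
    simp

theorem pvBuildPref_eq (nums : List Int) :
    pvBuildPref nums = (List.range (nums.length + 1)).map (fun k => (nums.take k).sum) := by
  have h := pvBuildPref_partial nums nums.length le_rfl
  simpa [pvBuildPref] using h

theorem pvBuildPref_get (nums : List Int) (i : Int) (h0 : 0 ≤ i) (h1 : i ≤ (nums.length : Int)) :
    PySem.List.pyGetD (pvBuildPref nums) i 0 = (nums.take i.toNat).sum := by
  rw [pvBuildPref_eq]
  rw [PySem.List.pyGetD_eq_getElem _ 0 h0 (by simp; omega)]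
  simp

-- prefix-difference = window sum
theorem pref_diff_eq_win (nums : List Int) (s e : Int) (hs : 0 ≤ s) (hse : s ≤ e + 1) :
    (nums.take (e + 1).toNat).sum - (nums.take s.toNat).sum = pvWin nums s e := by
  have hsplit : (e + 1).toNat = s.toNat + ((e + 1).toNat - s.toNat) := by omega
  rw [pvWin, PySem.List.slice_toNat nums hs (by omega), hsplit, List.take_add,
    List.sum_append]
  have : s.toNat + ((e + 1).toNat - s.toNat) - s.toNat = (e + 1).toNat - s.toNat := by omega
  rw [this]
  ring

-- the inner loop of A equals B's `any`, given covered < e and e+1 ≤ len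
theorem inner_eq (nums : List Int) (covered e : Int) (he : e + 1 ≤ (nums.length : Int))
    (hcov : covered < e) (ls : List Int) (hls : ∀ l ∈ ls, 0 ≤ l) :
    pvInnerA (pvBuildPref nums) covered e ls
      = ls.any (fun l =>
          decide (e - l + 1 ≥ 0) && decide (covered < e - l + 1) &&
          decide (pvWin nums (e - l + 1) e ≤ 0)) := by
  induction ls with
  | nil => rfl
  | cons l ls ih =>
    have hl : 0 ≤ l := hls l (List.mem_cons_self ..)
    have hls' : ∀ l' ∈ ls, 0 ≤ l' := fun l' h => hls l' (List.mem_cons_of_mem _ h)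
    simp only [pvInnerA, List.any_cons]
    by_cases h1 : e - (l - 1) < 0
    · have hb : ¬ (e - l + 1 ≥ 0) := by omega
      simp [h1, hb, ih hls']
    · by_cases h2 : covered ≥ e - (l - 1)
      · have hb : ¬ (covered < e - l + 1) := by omega
        have hc2 : covered ≤ e := le_of_lt hcov
        simp [h1, h2, hc2, hb, ih hls']
      · have hb2 : covered < e - l + 1 := by omega
        have hstart : e - (l - 1) = e - l + 1 := by ring
        have hdiff : PySem.List.pyGetD (pvBuildPref nums) (e + 1) 0
            - PySem.List.pyGetD (pvBuildPref nums) (e - (l - 1)) 0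
            = pvWin nums (e - l + 1) e := by
          rw [pvBuildPref_get nums (e + 1) (by omega) he,
            pvBuildPref_get nums (e - (l - 1)) (by omega) (by omega), hstart]
          exact pref_diff_eq_win nums (e - l + 1) e (by omega) (by omega)
        rw [hdiff]
        by_cases h3 : pvWin nums (e - l + 1) e ≤ 0
        · simp [h1, h2, hb2, h3]
          left
          omega
        · simp [h1, h2, hb2, h3, ih hls']

theorem loop_eq (nums : List Int) (es : List Int)
    (hmem : ∀ e ∈ es, e + 1 ≤ (nums.length : Int))
    (hsort : es.Pairwise (· < ·)) :
    ∀ (res covered : Int), (∀ e ∈ es, covered < e) →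
    es.foldl (fun st e => if pvInnerA (pvBuildPref nums) st.2 e [3, 4, 5] then (st.1 + 1, e) else st)
      (res, covered)
    = es.foldl (fun st e => if pvAnyB nums st.2 e then (st.1 + 1, e) else st) (res, covered) := by
  induction es with
  | nil => intro res covered _; rfl
  | cons e es ih =>
    intro res covered hcov
    have hmem' : ∀ x ∈ es, x + 1 ≤ (nums.length : Int) :=
      fun x hx => hmem x (List.mem_cons_of_mem _ hx)
    have hlt : ∀ x ∈ es, e < x := fun x hx => (List.pairwise_cons.1 hsort).1 x hx
    have hinner : pvInnerA (pvBuildPref nums) covered e [3, 4, 5] = pvAnyB nums covered e :=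
      inner_eq nums covered e (hmem e (List.mem_cons_self ..)) (hcov e (List.mem_cons_self ..))
        [3, 4, 5] (by intro l hl; fin_cases hl <;> norm_num)
    simp only [List.foldl_cons, hinner]
    by_cases hc : pvAnyB nums covered e
    · simp only [hc, if_pos]
      exact ih hmem' (List.pairwise_cons.1 hsort).2 (res + 1) e hlt
    · simp only [hc]
      exact ih hmem' (List.pairwise_cons.1 hsort).2 res covered
        (fun x hx => hcov x (List.mem_cons_of_mem _ hx))

-- ===== VERDICT (by name: the statement is the Claim_ definition above) =====
theorem makeArrayPositive_spec : Claim_equal_makeArrayPositive := by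
  intro nums _
  unfold Spec_makeArrayPositive makeArrayPositive makeArrayPositive_alt
  have h := loop_eq nums (PySem.List.pyRange 2 (nums.length : Int) 1)
    (by intro e hee; have := (PySem.List.mem_pyRange_one).1 hee; omega)
    (PySem.List.pairwise_lt_pyRange_one 2 (nums.length : Int))
    0 (-1)
    (by intro e hee; have := (PySem.List.mem_pyRange_one).1 hee; omega)
  simp [h]
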